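-- pv_equiv track=rewrite | github.com/Av7danger/Kai | examples/bug_bounty/advanced_tools.py | analyze_parameter_for_injection
-- ===== SOURCE A (Python) =====
-- from typing import List, Dict, Optional
--
-- def analyze_parameter_for_injection(param_name: str) -> List[str]:
--     """Analyze parameter name for potential injection types"""
--     injection_types = []
--
--     if any(keyword in param_name.lower() for keyword in ['id', 'user', 'admin', 'page']):
--         injection_types.append('sql_injection')
--
--     if any(keyword in param_name.lower() for keyword in ['cmd', 'command', 'exec']):
--         injection_types.append('command_injection')
--
--     if any(keyword in param_name.lower() for keyword in ['file', 'path', 'dir']):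
--         injection_types.append('path_traversal')
--
--     if any(keyword in param_name.lower() for keyword in ['url', 'redirect', 'link']):
--         injection_types.append('ssrf')
--
--     return injection_types
-- ===== SOURCE B (Python) =====
-- _KEYWORD_LABELS = [
--     ('id', 'sql_injection'), ('user', 'sql_injection'),
--     ('admin', 'sql_injection'), ('page', 'sql_injection'),
--     ('cmd', 'command_injection'), ('command', 'command_injection'),
--     ('exec', 'command_injection'),
--     ('file', 'path_traversal'), ('path', 'path_traversal'),
--     ('dir', 'path_traversal'),
--     ('url', 'ssrf'), ('redirect', 'ssrf'), ('link', 'ssrf'),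
-- ]
--
-- _LABEL_ORDER = ['sql_injection', 'command_injection', 'path_traversal', 'ssrf']
--
--
-- def analyze_parameter_for_injection(param_name):
--     """Single positional scan: at each index of the lowercased name, try every
--     keyword as a prefix and record its label in a found-set; emit labels in
--     the fixed order at the end."""
--     name = param_name.lower()
--     found = set()
--     for i in range(len(name)):
--         for keyword, label in _KEYWORD_LABELS:
--             if label not in found and name.startswith(keyword, i):
--                 found.add(label)
--     return [label for label in _LABEL_ORDER if label in found]
-- ===== Notes on version B (the rewrite author's own statement) =====
-- stated objective: alternative
-- what changed: Replaced four unrolled per-group substring tests with a single left-to-right positional scan of the lowercased name that prefix-matches a flat keyword-to-label table into a found-set, then emits the labels in a fixed order.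
import Mathlib
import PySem

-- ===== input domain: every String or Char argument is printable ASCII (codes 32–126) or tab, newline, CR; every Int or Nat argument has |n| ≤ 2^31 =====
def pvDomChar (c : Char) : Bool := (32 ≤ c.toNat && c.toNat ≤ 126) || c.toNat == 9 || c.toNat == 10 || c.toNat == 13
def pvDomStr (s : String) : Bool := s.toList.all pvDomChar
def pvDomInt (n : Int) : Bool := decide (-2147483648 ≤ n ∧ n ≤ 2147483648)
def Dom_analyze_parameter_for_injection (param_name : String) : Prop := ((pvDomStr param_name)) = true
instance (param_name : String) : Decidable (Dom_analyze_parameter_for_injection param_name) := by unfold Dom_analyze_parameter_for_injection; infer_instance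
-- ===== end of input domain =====

-- B replaces A's four unrolled substring-group tests with a single positional scan of the lowercased name that prefix-matches a flat keyword→label table into a found-set (alternative algorithm, same cost class).


-- ===== PORT A =====
-- Literal port of A: four independent `any` substring tests, each over `param_name.lower()`,
-- appending the label to the accumulated list in the source order.
def analyze_parameter_for_injection (param_name : String) : List String :=
  let t0 : List String := []
  let t1 : List String :=
    if (["id", "user", "admin", "page"].any
        (fun keyword => PySem.Str.isIn keyword (PySem.Str.lower param_name))) then
      t0 ++ ["sql_injection"] else t0
  let t2 : List String :=
    if (["cmd", "command", "exec"].any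
        (fun keyword => PySem.Str.isIn keyword (PySem.Str.lower param_name))) then
      t1 ++ ["command_injection"] else t1
  let t3 : List String :=
    if (["file", "path", "dir"].any
        (fun keyword => PySem.Str.isIn keyword (PySem.Str.lower param_name))) then
      t2 ++ ["path_traversal"] else t2
  let t4 : List String :=
    if (["url", "redirect", "link"].any
        (fun keyword => PySem.Str.isIn keyword (PySem.Str.lower param_name))) then
      t3 ++ ["ssrf"] else t3
  t4

-- ===== PORT B =====
-- B: one positional scan; at each index every (keyword, label) pair is tried as a
-- prefix (Python `name.startswith(keyword, i)` is ported exactly as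
-- `Chars.startswith (name.toList.drop i) keyword.toList` — i ranges over 0..len-1,
-- so the offset is nonnegative and in range) and matching labels go into a found-set.
def pvKeywordLabels : List (String × String) :=
  [("id", "sql_injection"), ("user", "sql_injection"),
   ("admin", "sql_injection"), ("page", "sql_injection"),
   ("cmd", "command_injection"), ("command", "command_injection"),
   ("exec", "command_injection"),
   ("file", "path_traversal"), ("path", "path_traversal"),
   ("dir", "path_traversal"),
   ("url", "ssrf"), ("redirect", "ssrf"), ("link", "ssrf")]

def pvLabelOrder : List String :=
  ["sql_injection", "command_injection", "path_traversal", "ssrf"]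

def analyze_parameter_for_injection_alt (param_name : String) : List String :=
  let name := PySem.Str.lower param_name
  let found : PySem.Set String :=
    (PySem.List.pyRange 0 (PySem.Str.len name) 1).foldl
      (fun found i =>
        pvKeywordLabels.foldl
          (fun found kl =>
            if !(PySem.Set.contains found kl.2)
               && PySem.Chars.startswith (name.toList.drop i.toNat) kl.1.toList then
              PySem.Set.add found kl.2
            else found)
          found)
      PySem.Set.empty
  pvLabelOrder.filter (fun label => PySem.Set.contains found label)

-- ===== PRECONDITION & SPEC =====
def Spec_analyze_parameter_for_injection (param_name : String) (out : List String) : Prop := out = analyze_parameter_for_injection_alt param_name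
instance (param_name : String) (out : List String) : Decidable (Spec_analyze_parameter_for_injection param_name out) := by unfold Spec_analyze_parameter_for_injection; infer_instance

-- ===== CLAIM (what is proved, stated in full; the proofs are below) =====
def Claim_equal_analyze_parameter_for_injection : Prop := ∀ (param_name : String), Dom_analyze_parameter_for_injection param_name → Spec_analyze_parameter_for_injection param_name (analyze_parameter_for_injection param_name)

-- ===== LEMMAS AND PROOFS =====

-- One table step: L is in the result iff it was there, or this pair labels L and its keyword matches here.
theorem pv_step_mem (s : List Char) (hd : String × String)
    (acc : PySem.Set String) (L : String) :
    L ∈ (if (!(PySem.Set.contains acc hd.2)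
             && PySem.Chars.startswith s hd.1.toList) then
           PySem.Set.add acc hd.2 else acc)
      ↔ L ∈ acc ∨ (hd.2 = L ∧ PySem.Chars.startswith s hd.1.toList = true) := by
  by_cases hc : PySem.Set.contains acc hd.2 = true
  · have hm : hd.2 ∈ acc := (PySem.Set.contains_iff acc hd.2).1 hc
    simp only [hc, Bool.not_true, Bool.false_and, Bool.false_eq_true, if_false]
    exact ⟨Or.inl, fun h => h.elim id (fun ⟨he, _⟩ => he ▸ hm)⟩
  · have hc' : PySem.Set.contains acc hd.2 = false := Bool.eq_false_iff.2 hc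
    by_cases hsw : PySem.Chars.startswith s hd.1.toList = true
    · simp only [hc', hsw, Bool.not_false, Bool.and_true, if_true,
        PySem.Set.mem_add]
      constructor
      · rintro (h | h)
        · exact Or.inl h
        · exact Or.inr ⟨h.symm, trivial⟩
      · rintro (h | ⟨he, _⟩)
        · exact Or.inl h
        · exact Or.inr he.symm
    · have hsw' : PySem.Chars.startswith s hd.1.toList = false := Bool.eq_false_iff.2 hsw
      simp only [hsw', Bool.and_false, Bool.false_eq_true, if_false]
      exact ⟨Or.inl, fun h => h.elim id (fun ⟨_, hf⟩ => hf.elim)⟩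

-- Membership after the inner fold over the keyword table: L was already found,
-- or some table pair (kw, L) has kw as a prefix of the string scanned from here.
theorem pv_inner_mem (s : List Char) (tbl : List (String × String))
    (acc : PySem.Set String) (L : String) :
    L ∈ (tbl.foldl
          (fun found kl =>
            if !(PySem.Set.contains found kl.2)
               && PySem.Chars.startswith s kl.1.toList then
              PySem.Set.add found kl.2
            else found)
          acc)
      ↔ L ∈ acc ∨ ∃ kl ∈ tbl, kl.2 = L ∧ PySem.Chars.startswith s kl.1.toList = true := by
  induction tbl generalizing acc with
  | nil => simp
  | cons hd tl ih =>
    simp only [List.foldl_cons, ih, pv_step_mem, List.mem_cons]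
    constructor
    · rintro ((h | ⟨h2, hsw⟩) | ⟨kl, hkl, h2, hsw⟩)
      · exact Or.inl h
      · exact Or.inr ⟨hd, Or.inl rfl, h2, hsw⟩
      · exact Or.inr ⟨kl, Or.inr hkl, h2, hsw⟩
    · rintro (h | ⟨kl, hkl | hkl, h2, hsw⟩)
      · exact Or.inl (Or.inl h)
      · exact Or.inl (Or.inr ⟨hkl ▸ h2, hkl ▸ hsw⟩)
      · exact Or.inr ⟨kl, hkl, h2, hsw⟩

-- Membership after the outer fold over a list of positions.
theorem pv_outer_mem (name : List Char) (ps : List Int)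
    (acc : PySem.Set String) (L : String) :
    L ∈ (ps.foldl
          (fun found i =>
            pvKeywordLabels.foldl
              (fun found kl =>
                if !(PySem.Set.contains found kl.2)
                   && PySem.Chars.startswith (name.drop i.toNat) kl.1.toList then
                  PySem.Set.add found kl.2
                else found)
              found)
          acc)
      ↔ L ∈ acc ∨ ∃ i ∈ ps, ∃ kl ∈ pvKeywordLabels, kl.2 = L ∧
          PySem.Chars.startswith (name.drop i.toNat) kl.1.toList = true := by
  induction ps generalizing acc with
  | nil => simp
  | cons p ps ih =>
    simp only [List.foldl_cons, ih, pv_inner_mem, List.mem_cons]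
    constructor
    · rintro ((h | ⟨kl, hkl, h2, hsw⟩) | ⟨i, hi, kl, hkl, h2, hsw⟩)
      · left; exact h
      · right; exact ⟨p, Or.inl rfl, kl, hkl, h2, hsw⟩
      · right; exact ⟨i, Or.inr hi, kl, hkl, h2, hsw⟩
    · rintro (h | ⟨i, hi | hi, kl, hkl, h2, hsw⟩)
      · exact Or.inl (Or.inl h)
      · subst hi
        exact Or.inl (Or.inr ⟨kl, hkl, h2, hsw⟩)
      · exact Or.inr ⟨i, hi, kl, hkl, h2, hsw⟩

-- A keyword occurs at some scanned position iff it is a substring (keywords are nonempty).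
theorem pv_scan_iff_isIn (name : List Char) (kw : List Char) (hkw : kw ≠ []) :
    (∃ i ∈ PySem.List.pyRange 0 (name.length : Int) 1,
        PySem.Chars.startswith (name.drop i.toNat) kw = true)
      ↔ PySem.Chars.isIn kw name = true := by
  rw [← PySem.Chars.exists_prefix_drop_iff_isIn]
  constructor
  · rintro ⟨i, _, hsw⟩
    exact ⟨i.toNat, (PySem.Chars.startswith_iff _ _).1 hsw⟩
  · rintro ⟨j, hpre⟩
    have hj : j < name.length := by
      by_contra h
      rw [Nat.not_lt] at h
      rw [List.drop_eq_nil_of_le h] at hpre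
      exact hkw (List.prefix_nil.1 hpre)
    refine ⟨(j : Int), ?_, ?_⟩
    · rw [PySem.List.mem_pyRange_one]
      constructor
      · exact_mod_cast Nat.zero_le j
      · exact_mod_cast hj
    · rw [Int.toNat_natCast]
      exact (PySem.Chars.startswith_iff _ _).2 hpre

-- For one label with its keyword group: found-set membership ↔ A's `any` test.
theorem pv_label_iff (param_name : String) (L : String) (kws : List String)
    (hgrp : ∀ kl ∈ pvKeywordLabels, kl.2 = L → kl.1 ∈ kws)
    (hcov : ∀ kw ∈ kws, (kw, L) ∈ pvKeywordLabels)
    (hne : ∀ kw ∈ kws, kw.toList ≠ []) :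
    (L ∈ ((PySem.List.pyRange 0 (PySem.Str.len (PySem.Str.lower param_name)) 1).foldl
          (fun found i =>
            pvKeywordLabels.foldl
              (fun found kl =>
                if !(PySem.Set.contains found kl.2)
                   && PySem.Chars.startswith ((PySem.Str.lower param_name).toList.drop i.toNat) kl.1.toList then
                  PySem.Set.add found kl.2
                else found)
              found)
          PySem.Set.empty))
      ↔ (kws.any (fun keyword => PySem.Str.isIn keyword (PySem.Str.lower param_name)) = true) := by
  rw [pv_outer_mem]
  have hlen : PySem.Str.len (PySem.Str.lower param_name)
      = ((PySem.Str.lower param_name).toList.length : Int) := by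
    simp [PySem.Str.len]
  rw [hlen]
  simp only [PySem.Set.empty, List.not_mem_nil, false_or, List.any_eq_true]
  constructor
  · rintro ⟨i, hi, kl, hkl, h2, hsw⟩
    refine ⟨kl.1, hgrp kl hkl h2, ?_⟩
    have := (pv_scan_iff_isIn (PySem.Str.lower param_name).toList kl.1.toList
        (hne kl.1 (hgrp kl hkl h2))).1 ⟨i, hi, hsw⟩
    simpa [PySem.Str.isIn] using this
  · rintro ⟨kw, hkw, hin⟩
    have hin' : PySem.Chars.isIn kw.toList (PySem.Str.lower param_name).toList = true := by
      simpa [PySem.Str.isIn] using hin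
    obtain ⟨i, hi, hsw⟩ := (pv_scan_iff_isIn _ _ (hne kw hkw)).2 hin'
    exact ⟨i, hi, (kw, L), hcov kw hkw, rfl, hsw⟩

-- ===== VERDICT (by name: the statement is the Claim_ definition above) =====
theorem analyze_parameter_for_injection_spec : Claim_equal_analyze_parameter_for_injection := by
  intro param_name _
  unfold Spec_analyze_parameter_for_injection
  simp only [analyze_parameter_for_injection, analyze_parameter_for_injection_alt]
  have hb1 := Bool.eq_iff_iff.2 (Iff.trans (PySem.Set.contains_iff _ _)
    (pv_label_iff param_name "sql_injection" ["id", "user", "admin", "page"]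
      (by decide) (by decide) (by decide)))
  have hb2 := Bool.eq_iff_iff.2 (Iff.trans (PySem.Set.contains_iff _ _)
    (pv_label_iff param_name "command_injection" ["cmd", "command", "exec"]
      (by decide) (by decide) (by decide)))
  have hb3 := Bool.eq_iff_iff.2 (Iff.trans (PySem.Set.contains_iff _ _)
    (pv_label_iff param_name "path_traversal" ["file", "path", "dir"]
      (by decide) (by decide) (by decide)))
  have hb4 := Bool.eq_iff_iff.2 (Iff.trans (PySem.Set.contains_iff _ _)
    (pv_label_iff param_name "ssrf" ["url", "redirect", "link"]
      (by decide) (by decide) (by decide)))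
  simp only [pvLabelOrder, List.filter, hb1, hb2, hb3, hb4]
  generalize (List.any ["id", "user", "admin", "page"]
      fun keyword => PySem.Str.isIn keyword (PySem.Str.lower param_name)) = b1
  generalize (List.any ["cmd", "command", "exec"]
      fun keyword => PySem.Str.isIn keyword (PySem.Str.lower param_name)) = b2
  generalize (List.any ["file", "path", "dir"]
      fun keyword => PySem.Str.isIn keyword (PySem.Str.lower param_name)) = b3
  generalize (List.any ["url", "redirect", "link"]
      fun keyword => PySem.Str.isIn keyword (PySem.Str.lower param_name)) = b4
  cases b1 <;> cases b2 <;> cases b3 <;> cases b4 <;> rfl
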